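-- pv_equiv track=rewrite | github.com/crystal30/DataStructure | PycharmProjects/leetcode/collision_pointer&sliding_window/最小覆盖子串76.py | is_contains
-- ===== SOURCE A (Python) =====
-- def is_contains(s_dict, t_dict):
--
--     t_dict_keys = set(t_dict.keys())
--     s_dict_keys = set(s_dict.keys())
--
--     if len(t_dict_keys.difference(s_dict_keys)) == 0:
--         for k in t_dict_keys:
--             if t_dict[k] > s_dict[k]:
--                 return False
--         return True
--
--     else:
--         return False
-- ===== SOURCE B (Python) =====
-- def is_contains(s_dict, t_dict):
--     # Pass over s_dict, crossing off each requirement of t_dict that s_dict's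
--     # entry satisfies; covered iff no requirement remains.
--     remaining = dict(t_dict)
--     for k, sv in s_dict.items():
--         if k in remaining and remaining[k] <= sv:
--             del remaining[k]
--     return not remaining
-- ===== Notes on version B (the rewrite author's own statement) =====
-- stated objective: alternative
-- what changed: B inverts the traversal: instead of A's key-set difference subset test plus a loop over t_dict's keys looking each up in s_dict, B makes one pass over s_dict crossing satisfied requirements off a mutable copy of t_dict and returns whether any remain; Pre_ requires both lists' keys to be distinct, which every Python dict satisfies (duplicate-key association lists represent no dict).
import Mathlib
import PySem

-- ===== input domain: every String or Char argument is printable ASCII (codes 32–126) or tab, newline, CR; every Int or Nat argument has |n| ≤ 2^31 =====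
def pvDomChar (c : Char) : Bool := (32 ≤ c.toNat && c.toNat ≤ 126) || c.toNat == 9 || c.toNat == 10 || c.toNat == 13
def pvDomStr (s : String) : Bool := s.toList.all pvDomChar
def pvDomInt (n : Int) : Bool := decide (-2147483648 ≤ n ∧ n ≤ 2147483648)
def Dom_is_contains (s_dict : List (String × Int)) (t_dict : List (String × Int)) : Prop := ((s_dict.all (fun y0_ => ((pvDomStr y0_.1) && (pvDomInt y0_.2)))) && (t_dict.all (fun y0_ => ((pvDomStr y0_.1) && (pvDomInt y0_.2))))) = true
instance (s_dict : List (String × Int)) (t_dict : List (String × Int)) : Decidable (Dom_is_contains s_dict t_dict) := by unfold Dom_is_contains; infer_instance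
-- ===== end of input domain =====

-- B inverts the traversal: instead of A's set-difference subset test plus a loop over t_dict's
-- keys looking each up in s_dict, B makes one pass over s_dict crossing satisfied requirements
-- off a mutable copy of t_dict and tests emptiness (objective: alternative).

-- ===== PORT A =====
-- 'for k in t_dict_keys: if t_dict[k] > s_dict[k]: return False / return True'.
-- The loop runs only when the set difference is empty, so both lookups always hit
-- (so '.getD 0' is never the result of an actual KeyError on that branch).
def isContainsLoop (s_dict : List (String × Int)) (t_dict : List (String × Int)) : List String → Bool
  | [] => true
  | k :: rest =>
    if ((PySem.Dict.mk t_dict).get? k).getD 0 > ((PySem.Dict.mk s_dict).get? k).getD 0 then false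
    else isContainsLoop s_dict t_dict rest

def is_contains (s_dict : List (String × Int)) (t_dict : List (String × Int)) : Bool :=
  let t_dict_keys := PySem.Set.ofList (t_dict.map Prod.fst)
  let s_dict_keys := PySem.Set.ofList (s_dict.map Prod.fst)
  if PySem.Set.len (PySem.Set.diff t_dict_keys s_dict_keys) == 0 then
    isContainsLoop s_dict t_dict t_dict_keys
  else
    false

-- ===== PORT B =====
-- remaining = dict(t_dict); for k, sv in s_dict.items(): if k in remaining and
-- remaining[k] <= sv: del remaining[k];  return not remaining
def is_contains_alt (s_dict : List (String × Int)) (t_dict : List (String × Int)) : Bool :=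
  (s_dict.foldl
    (fun remaining p =>
      match remaining.get? p.1 with
      | some rv => if rv ≤ p.2 then remaining.erase p.1 else remaining
      | none => remaining)
    (PySem.Dict.mk t_dict)).items.isEmpty

-- ===== PRECONDITION & SPEC =====
-- Pre_ requires both argument lists to have distinct keys: a Python dict always has distinct
-- keys, so every actual input of A satisfies this; duplicate-key lists represent no dict.
def Pre_is_contains (s_dict : List (String × Int)) (t_dict : List (String × Int)) : Prop :=
  (s_dict.map Prod.fst).Nodup ∧ (t_dict.map Prod.fst).Nodup
instance (s_dict : List (String × Int)) (t_dict : List (String × Int)) : Decidable (Pre_is_contains s_dict t_dict) := by unfold Pre_is_contains; infer_instance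

def pvWitness_is_contains : (List (String × Int)) × (List (String × Int)) :=
  ([("a", 2), ("b", 1)], [("a", 1)])

def Spec_is_contains (s_dict : List (String × Int)) (t_dict : List (String × Int)) (out : Bool) : Prop := out = is_contains_alt s_dict t_dict
instance (s_dict : List (String × Int)) (t_dict : List (String × Int)) (out : Bool) : Decidable (Spec_is_contains s_dict t_dict out) := by unfold Spec_is_contains; infer_instance

-- ===== CLAIM (what is proved, stated in full; the proofs are below) =====
def Claim_equal_is_contains : Prop := ∀ (s_dict : List (String × Int)) (t_dict : List (String × Int)), Dom_is_contains s_dict t_dict → Pre_is_contains s_dict t_dict → Spec_is_contains s_dict t_dict (is_contains s_dict t_dict)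

-- ===== LEMMAS AND PROOFS =====

-- the per-requirement check A effectively performs: look kv.1 up in s_dict
def pvCheck (s_dict : List (String × Int)) (kv : String × Int) : Bool :=
  match (PySem.Dict.mk s_dict).get? kv.1 with
  | some sv => decide (kv.2 ≤ sv)
  | none => false

-- 'p satisfies requirement kv'
def pvMatch (kv p : String × Int) : Bool := p.1 == kv.1 && decide (kv.2 ≤ p.2)

-- in a nodup-key list, the value at a key is unique
theorem pvKeyUnique {r : List (String × Int)} (hr : (r.map Prod.fst).Nodup)
    {k : String} {a b : Int} (ha : (k, a) ∈ r) (hb : (k, b) ∈ r) : a = b := by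
  induction r with
  | nil => cases ha
  | cons q rest ih =>
    simp only [List.map_cons, List.nodup_cons] at hr
    rcases List.mem_cons.mp ha with h1 | h1 <;> rcases List.mem_cons.mp hb with h2 | h2
    · rw [← h1] at h2; exact ((Prod.ext_iff.mp h2).2).symm
    · exfalso; rw [← h1] at hr
      exact hr.1 (List.mem_map.mpr ⟨(k, b), h2, rfl⟩)
    · exfalso; rw [← h2] at hr
      exact hr.1 (List.mem_map.mpr ⟨(k, a), h1, rfl⟩)
    · exact ih hr.2 h1 h2

-- A's lookup-based check equals an existential scan of s_dict, when s_dict's keys are unique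
theorem pvCheck_eq_any (s_dict : List (String × Int)) (hs : (s_dict.map Prod.fst).Nodup)
    (kv : String × Int) : pvCheck s_dict kv = s_dict.any (pvMatch kv) := by
  induction s_dict with
  | nil => rfl
  | cons p rest ih =>
    obtain ⟨k, sv⟩ := p
    simp only [List.map_cons, List.nodup_cons] at hs
    simp only [pvCheck, PySem.Dict.get?_mk_cons, List.any_cons, pvMatch]
    by_cases hk : k = kv.1
    · have hrest : rest.any (pvMatch kv) = false := by
        rw [List.any_eq_false]
        intro q hq
        have hne : q.1 ≠ k := fun h => hs.1 (h ▸ List.mem_map_of_mem hq)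
        have : (q.1 == kv.1) = false := beq_eq_false_iff_ne.mpr (hk ▸ hne)
        simp [pvMatch, this]
      have hbeq : (k == kv.1) = true := beq_iff_eq.mpr hk
      simp [hbeq, hrest]
    · have hbeq : (k == kv.1) = false := beq_eq_false_iff_ne.mpr hk
      simp only [hbeq, Bool.false_and, Bool.false_or]
      have := ih hs.2
      simpa [pvCheck, pvMatch] using this

-- A equals the per-requirement check over all of t_dict (previous-style proof)
theorem pvA_eq_all (s_dict t_dict : List (String × Int))
    (ht : (t_dict.map Prod.fst).Nodup) :
    is_contains s_dict t_dict = t_dict.all (pvCheck s_dict) := by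
  unfold is_contains
  by_cases hd : PySem.Set.diff (PySem.Set.ofList (t_dict.map Prod.fst))
      (PySem.Set.ofList (s_dict.map Prod.fst)) = []
  · have hcov : ∀ kv ∈ t_dict, ((PySem.Dict.mk s_dict).get? kv.1).isSome := by
      intro kv hkv
      have hkt : kv.1 ∈ t_dict.map Prod.fst := List.mem_map_of_mem hkv
      have hks : kv.1 ∈ s_dict.map Prod.fst := by
        by_contra hns
        have : kv.1 ∈ PySem.Set.diff (PySem.Set.ofList (t_dict.map Prod.fst))
            (PySem.Set.ofList (s_dict.map Prod.fst)) := by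
          rw [PySem.Set.mem_diff]
          simp [PySem.Set.mem_ofList, hkt, hns]
        simp [hd] at this
      obtain ⟨p, hp, hpe⟩ := List.mem_map.mp hks
      rw [Option.isSome_iff_ne_none]
      intro hnone
      refine ((PySem.Dict.get?_eq_none_iff_not_mem_keys _ _).mp hnone) ?_
      simp only [PySem.Dict.keys, List.mem_map]
      exact ⟨p, hp, hpe⟩
    have hcond : (PySem.Set.len (PySem.Set.diff (PySem.Set.ofList (t_dict.map Prod.fst))
        (PySem.Set.ofList (s_dict.map Prod.fst))) == 0) = true := by
      simp [PySem.Set.len, hd]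
    have hkeys : PySem.Set.ofList (t_dict.map Prod.fst) = t_dict.map Prod.fst :=
      PySem.Set.ofList_eq_self_of_nodup _ ht
    simp only [hcond, if_true]
    rw [hkeys]
    -- the loop over t_dict's keys equals the all-scan over t_dict's items
    clear hcond hkeys hd
    have : ∀ (sub : List (String × Int)), (∀ kv ∈ sub, kv ∈ t_dict) →
        isContainsLoop s_dict t_dict (sub.map Prod.fst) = sub.all (pvCheck s_dict) := by
      intro sub
      induction sub with
      | nil => intro _; rfl
      | cons kv rest ih =>
        intro hsub
        obtain ⟨k, v⟩ := kv
        have hmem : (k, v) ∈ t_dict := hsub (k, v) (List.mem_cons_self ..)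
        have hget : (PySem.Dict.mk t_dict).get? k = some v := by
          apply PySem.Dict.get?_of_mem_items
          · simpa [PySem.Dict.items] using hmem
          · simpa [PySem.Dict.keys] using ht
        obtain ⟨sv, hsv⟩ := Option.isSome_iff_exists.mp (hcov (k, v) hmem)
        have hrest := ih (fun kv h => hsub kv (List.mem_cons_of_mem _ h))
        simp only [List.map_cons, isContainsLoop, hget, hsv, Option.getD_some, List.all_cons,
          hrest, pvCheck]
        by_cases hlt : sv < v
        · have hnle : ¬ (v ≤ sv) := by omega
          simp [hlt, hnle]
        · have hle : v ≤ sv := by omega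
          simp [hlt, hle]
    exact this t_dict (fun _ h => h)
  · have hcond : (PySem.Set.len (PySem.Set.diff (PySem.Set.ofList (t_dict.map Prod.fst))
        (PySem.Set.ofList (s_dict.map Prod.fst))) == 0) = false := by
      simp [PySem.Set.len, List.length_eq_zero_iff, hd]
    obtain ⟨k, hk⟩ := List.exists_mem_of_ne_nil _ hd
    rw [PySem.Set.mem_diff] at hk
    obtain ⟨hkt, hks⟩ := hk
    rw [PySem.Set.mem_ofList] at hkt
    rw [PySem.Set.mem_ofList] at hks
    obtain ⟨kv, hkv, hfst⟩ := List.mem_map.mp hkt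
    have hnone : (PySem.Dict.mk s_dict).get? kv.1 = none := by
      rw [PySem.Dict.get?_eq_none_iff_not_mem_keys]
      simp only [PySem.Dict.keys, List.mem_map, not_exists]
      rintro p ⟨hp, hpe⟩
      exact hks (hfst ▸ hpe ▸ List.mem_map_of_mem hp)
    have hall : t_dict.all (pvCheck s_dict) = false := by
      rw [List.all_eq_false]
      exact ⟨kv, hkv, by simp [pvCheck, hnone]⟩
    simp only [hcond, Bool.false_eq_true, if_false, hall]

-- B's crossing-off pass leaves exactly the unsatisfied requirements
theorem pvFold_items (s_dict : List (String × Int)) :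
    ∀ (r : List (String × Int)), (r.map Prod.fst).Nodup →
    (s_dict.foldl
      (fun remaining p =>
        match remaining.get? p.1 with
        | some rv => if rv ≤ p.2 then remaining.erase p.1 else remaining
        | none => remaining)
      (PySem.Dict.mk r)).items = r.filter (fun kv => !(s_dict.any (pvMatch kv))) := by
  induction s_dict with
  | nil =>
    intro r _
    simp
  | cons p s' ih =>
    intro r hr
    rw [List.foldl_cons]
    rcases hget : (PySem.Dict.mk r).get? p.1 with _ | rv
    · -- no key p.1 in r: remaining unchanged, and p matches nothing in r
      rw [ih r hr]
      refine (List.filter_congr ?_).symm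
      intro kv hkv
      have hne : kv.1 ≠ p.1 := by
        intro h
        refine ((PySem.Dict.get?_eq_none_iff_not_mem_keys _ _).mp hget) ?_
        simp only [PySem.Dict.keys, List.mem_map]
        exact ⟨kv, hkv, h⟩
      have hbeq : (p.1 == kv.1) = false := beq_eq_false_iff_ne.mpr (fun h => hne h.symm)
      have hm : pvMatch kv p = false := by simp [pvMatch, hbeq]
      simp [hm]
    · have hmem : (p.1, rv) ∈ r := by
        have := PySem.Dict.mem_items_of_get?_eq_some (PySem.Dict.mk r) hget
        simpa [PySem.Dict.items] using this
      by_cases hle : rv ≤ p.2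
      · -- requirement p.1 satisfied: erased
        simp only [hle, if_true]
        have herase : (PySem.Dict.mk r).erase p.1
            = PySem.Dict.mk (r.filter (fun q => !(q.1 == p.1))) := rfl
        rw [herase, ih _ (by
          refine List.Nodup.sublist ?_ hr
          exact List.Sublist.map _ List.filter_sublist)]
        rw [List.filter_filter]
        refine (List.filter_congr ?_).symm
        intro kv hkv
        by_cases hk : kv.1 = p.1
        · have : kv.2 = rv := pvKeyUnique hr (hk ▸ hkv) hmem
          have hm : pvMatch kv p = true := by simp [pvMatch, hk, this, hle]
          simp [hm, hk]
        · have hbeq : (p.1 == kv.1) = false := beq_eq_false_iff_ne.mpr (fun h => hk h.symm)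
          have hm : pvMatch kv p = false := by simp [pvMatch, hbeq]
          have : (kv.1 == p.1) = false := beq_eq_false_iff_ne.mpr hk
          simp [hm, this]
      · -- requirement p.1 not satisfied by this entry: unchanged
        simp only [hle, if_false]
        rw [ih r hr]
        refine (List.filter_congr ?_).symm
        intro kv hkv
        have hm : pvMatch kv p = false := by
          by_cases hk : kv.1 = p.1
          · have hv : kv.2 = rv := pvKeyUnique hr (hk ▸ hkv) hmem
            simp [pvMatch, hv, hle]
          · have hbeq : (p.1 == kv.1) = false := beq_eq_false_iff_ne.mpr (fun h => hk h.symm)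
            simp [pvMatch, hbeq]
        simp [hm]

theorem pvAllCongr {α : Type} (l : List α) (f g : α → Bool)
    (h : ∀ x ∈ l, f x = g x) : l.all f = l.all g := by
  induction l with
  | nil => rfl
  | cons x xs ih =>
    simp only [List.all_cons, h x (List.mem_cons_self ..),
      ih (fun y hy => h y (List.mem_cons_of_mem _ hy))]

theorem pvFilterNot_isEmpty {α : Type} (l : List α) (c : α → Bool) :
    (l.filter (fun x => !(c x))).isEmpty = l.all c := by
  induction l with
  | nil => rfl
  | cons x xs ih => cases hx : c x <;> simp [hx, ih]

theorem pvB_eq_all (s_dict t_dict : List (String × Int))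
    (ht : (t_dict.map Prod.fst).Nodup) :
    is_contains_alt s_dict t_dict = t_dict.all (fun kv => s_dict.any (pvMatch kv)) := by
  unfold is_contains_alt
  rw [pvFold_items s_dict t_dict ht, pvFilterNot_isEmpty]

theorem is_contains_eq (s_dict t_dict : List (String × Int))
    (hs : (s_dict.map Prod.fst).Nodup) (ht : (t_dict.map Prod.fst).Nodup) :
    is_contains s_dict t_dict = is_contains_alt s_dict t_dict := by
  rw [pvA_eq_all s_dict t_dict ht, pvB_eq_all s_dict t_dict ht]
  exact pvAllCongr t_dict _ _ (fun kv _ => pvCheck_eq_any s_dict hs kv)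

-- ===== VERDICT (by name: the statement is the Claim_ definition above) =====
theorem is_contains_spec : Claim_equal_is_contains := by
  intro s_dict t_dict _hdom hpre
  unfold Spec_is_contains
  exact is_contains_eq s_dict t_dict hpre.1 hpre.2
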